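-- pv_equiv track=rewrite | github.com/niraj-sh7/OncoVision | training/eval_and_plots.py | infer_class_indices
-- ===== SOURCE A (Python) =====
-- def infer_class_indices(class_to_idx: dict):
--     """
--     Try to detect which index corresponds to 'normal' vs 'cancer'.
--     Accepts names like '0_normal', '1_cancer', 'normal', 'benign', 'cancer', case-insensitive.
--     Returns (idx_normal, idx_cancer). If not found, returns (None, None).
--     """
--     idx_normal = None
--     idx_cancer = None
--     for name, idx in class_to_idx.items():
--         key = name.lower()
--         if ("normal" in key) or ("benign" in key):
--             if key.startswith("0_") or key == "0_normal":
--                 idx_normal = idx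
--             elif idx_normal is None:
--                 idx_normal = idx
--         if "cancer" in key:
--             if key.startswith("1_") or key == "1_cancer":
--                 idx_cancer = idx
--             elif idx_cancer is None:
--                 idx_cancer = idx
--     return idx_normal, idx_cancer
-- ===== SOURCE B (Python) =====
-- def infer_class_indices(class_to_idx: dict):
--     """Collect-then-select: per class, gather matching entries in order, then
--     pick the last prefix-tagged match, else the first match, else None."""
--     def pick(matches, prefix):
--         prio = [idx for key, idx in matches if key.startswith(prefix)]
--         if prio:
--             return prio[-1]
--         return matches[0][1] if matches else None
--
--     keyed = [(name.lower(), idx) for name, idx in class_to_idx.items()]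
--     normals = [(k, i) for k, i in keyed if "normal" in k or "benign" in k]
--     cancers = [(k, i) for k, i in keyed if "cancer" in k]
--     return pick(normals, "0_"), pick(cancers, "1_")
-- ===== Notes on version B (the rewrite author's own statement) =====
-- stated objective: simpler
-- what changed: Replaced A's one-pass stateful accumulator (overwrite on prefixed match, set-if-None on plain match) by a collect-then-select decomposition: filter the matching entries per class, then pick the last prefix-tagged one, else the first match, else None.
import Mathlib
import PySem

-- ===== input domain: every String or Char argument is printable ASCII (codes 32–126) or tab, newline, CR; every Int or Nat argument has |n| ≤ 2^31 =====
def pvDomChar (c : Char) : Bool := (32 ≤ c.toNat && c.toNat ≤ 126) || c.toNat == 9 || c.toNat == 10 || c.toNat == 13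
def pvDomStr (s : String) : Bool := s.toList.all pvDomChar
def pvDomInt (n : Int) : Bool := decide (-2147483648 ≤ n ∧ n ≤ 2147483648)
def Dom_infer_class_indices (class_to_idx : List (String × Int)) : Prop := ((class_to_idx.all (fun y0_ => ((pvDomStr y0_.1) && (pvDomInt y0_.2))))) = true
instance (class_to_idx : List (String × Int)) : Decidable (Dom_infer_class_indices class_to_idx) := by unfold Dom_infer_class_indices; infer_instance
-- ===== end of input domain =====

-- B replaces A's stateful overwrite/else-set accumulator by a collect-then-select decomposition
-- (filter matches per class, pick the last prefix-tagged match else the first match); objective: simpler.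


-- ===== PORT A =====
-- literal transliteration of A's single loop with the two accumulators
def infer_class_indices (class_to_idx : List (String × Int)) : Option Int × Option Int :=
  class_to_idx.foldl
    (fun acc p =>
      let key := PySem.Str.lower p.1
      let idx_normal :=
        if PySem.Str.isIn "normal" key || PySem.Str.isIn "benign" key then
          if PySem.Str.startswith key "0_" || key == "0_normal" then some p.2
          else if acc.1 = none then some p.2
          else acc.1
        else acc.1
      let idx_cancer :=
        if PySem.Str.isIn "cancer" key then
          if PySem.Str.startswith key "1_" || key == "1_cancer" then some p.2
          else if acc.2 = none then some p.2
          else acc.2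
        else acc.2
      (idx_normal, idx_cancer))
    (none, none)

-- ===== PORT B =====
-- Source B's pick: last prefix-tagged index if any, else the first match's index, else none
def pvPick (ms : List (String × Int)) (pre : String) : Option Int :=
  let prio := (ms.filter (fun p => PySem.Str.startswith p.1 pre)).map Prod.snd
  match prio.getLast? with
  | some v => some v
  | none => (ms.map Prod.snd).head?

def infer_class_indices_alt (class_to_idx : List (String × Int)) : Option Int × Option Int :=
  let keyed := class_to_idx.map (fun p => (PySem.Str.lower p.1, p.2))
  let normals := keyed.filter (fun p => PySem.Str.isIn "normal" p.1 || PySem.Str.isIn "benign" p.1)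
  let cancers := keyed.filter (fun p => PySem.Str.isIn "cancer" p.1)
  (pvPick normals "0_", pvPick cancers "1_")

-- ===== PRECONDITION & SPEC =====
-- Pre_ excludes association lists with duplicate keys: those cannot arise from a Python dict
-- (a dict collapses duplicates), so the list encoding's per-occurrence behaviour is accidental.
def Pre_infer_class_indices (class_to_idx : List (String × Int)) : Prop :=
  (class_to_idx.map Prod.fst).Nodup
instance (class_to_idx : List (String × Int)) : Decidable (Pre_infer_class_indices class_to_idx) := by
  unfold Pre_infer_class_indices; infer_instance
def pvWitness_infer_class_indices : (List (String × Int)) := [("0_normal", 0), ("1_cancer", 1)]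

def Spec_infer_class_indices (class_to_idx : List (String × Int)) (out : Option Int × Option Int) : Prop := out = infer_class_indices_alt class_to_idx
instance (class_to_idx : List (String × Int)) (out : Option Int × Option Int) : Decidable (Spec_infer_class_indices class_to_idx out) := by unfold Spec_infer_class_indices; infer_instance

-- ===== CLAIM (what is proved, stated in full; the proofs are below) =====
def Claim_equal_infer_class_indices : Prop := ∀ (class_to_idx : List (String × Int)), Dom_infer_class_indices class_to_idx → Pre_infer_class_indices class_to_idx → Spec_infer_class_indices class_to_idx (infer_class_indices class_to_idx)

-- ===== LEMMAS AND PROOFS =====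

-- generic "collect-then-select" value of A's accumulator update, started from state a
def pvSel (m q : String × Int → Bool) (xs : List (String × Int)) (a : Option Int) : Option Int :=
  match ((xs.filter (fun p => m p && q p)).map Prod.snd).getLast? with
  | some v => some v
  | none =>
    match a with
    | some v => some v
    | none => ((xs.filter m).map Prod.snd).head?

lemma pvSel_cons_prio (m q : String × Int → Bool) (x : String × Int) (xs : List (String × Int))
    (a : Option Int) (hm : m x = true) (hq : q x = true) :
    pvSel m q (x :: xs) a = pvSel m q xs (some x.2) := by
  simp only [pvSel, List.filter_cons, hm, hq, Bool.and_self, if_pos, List.map_cons,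
    List.getLast?_cons]
  cases h : ((xs.filter (fun p => m p && q p)).map Prod.snd).getLast? <;> simp

lemma pvSel_cons_plain (m q : String × Int → Bool) (x : String × Int) (xs : List (String × Int))
    (a : Option Int) (hm : m x = true) (hq : q x = false) :
    pvSel m q (x :: xs) a = pvSel m q xs (match a with | some v => some v | none => some x.2) := by
  simp only [pvSel, List.filter_cons, hm, hq, Bool.and_false]
  cases a <;> simp

lemma pvSel_cons_skip (m q : String × Int → Bool) (x : String × Int) (xs : List (String × Int))
    (a : Option Int) (hm : m x = false) :
    pvSel m q (x :: xs) a = pvSel m q xs a := by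
  simp only [pvSel, List.filter_cons, hm, Bool.false_and]
  simp

-- one step of A's accumulator update, expressed on pvSel
lemma pvStepSel (m q : String × Int → Bool) (x : String × Int) (xs : List (String × Int))
    (a : Option Int) :
    pvSel m q (x :: xs) a
    = pvSel m q xs
        (if m x then (if q x then some x.2 else if a = none then some x.2 else a) else a) := by
  by_cases hm : m x = true
  · by_cases hq : q x = true
    · rw [pvSel_cons_prio _ _ _ _ _ hm hq, hm, hq]; simp
    · rw [pvSel_cons_plain _ _ _ _ _ hm (Bool.eq_false_iff.mpr hq), hm]
      simp only [if_true]
      rw [if_neg hq]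
      cases a <;> simp
  · rw [pvSel_cons_skip _ _ _ _ _ (Bool.eq_false_iff.mpr hm)]
    rw [if_neg hm]

-- A's fold, componentwise, equals pvSel
lemma pvFold_eq_sel (xs : List (String × Int)) (a c : Option Int) :
    xs.foldl
      (fun acc p =>
        let key := PySem.Str.lower p.1
        let idx_normal :=
          if PySem.Str.isIn "normal" key || PySem.Str.isIn "benign" key then
            if PySem.Str.startswith key "0_" || key == "0_normal" then some p.2
            else if acc.1 = none then some p.2
            else acc.1
          else acc.1
        let idx_cancer :=
          if PySem.Str.isIn "cancer" key then
            if PySem.Str.startswith key "1_" || key == "1_cancer" then some p.2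
            else if acc.2 = none then some p.2
            else acc.2
          else acc.2
        (idx_normal, idx_cancer)) (a, c)
    = (pvSel (fun p => PySem.Str.isIn "normal" (PySem.Str.lower p.1) || PySem.Str.isIn "benign" (PySem.Str.lower p.1))
             (fun p => PySem.Str.startswith (PySem.Str.lower p.1) "0_" || (PySem.Str.lower p.1 == "0_normal")) xs a,
       pvSel (fun p => PySem.Str.isIn "cancer" (PySem.Str.lower p.1))
             (fun p => PySem.Str.startswith (PySem.Str.lower p.1) "1_" || (PySem.Str.lower p.1 == "1_cancer")) xs c) := by
  induction xs generalizing a c with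
  | nil => cases a <;> cases c <;> simp [pvSel]
  | cons x xs ih =>
    rw [List.foldl_cons, ih, pvStepSel, pvStepSel]

-- A's redundant \'key == "0_normal"\' / \'key == "1_cancer"\' disjuncts are subsumed by startswith
lemma pvStarts0 (s : String) :
    (PySem.Str.startswith s "0_" || (s == "0_normal")) = PySem.Str.startswith s "0_" := by
  by_cases h : s = "0_normal"
  · subst h; decide
  · simp [h]

lemma pvStarts1 (s : String) :
    (PySem.Str.startswith s "1_" || (s == "1_cancer")) = PySem.Str.startswith s "1_" := by
  by_cases h : s = "1_cancer"
  · subst h; decide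
  · simp [h]

-- B's pick equals pvSel over the original list (with none as the start state)
lemma pvPick_eq_sel (m : String × Int → Bool) (pre : String) (xs : List (String × Int)) :
    pvPick ((xs.map (fun p => (PySem.Str.lower p.1, p.2))).filter m) pre
    = pvSel (fun p => m (PySem.Str.lower p.1, p.2))
            (fun p => PySem.Str.startswith (PySem.Str.lower p.1) pre) xs none := by
  simp only [pvPick, pvSel, List.filter_map, List.map_map, List.filter_filter,
    Function.comp_def, Bool.and_comm]

-- ===== VERDICT (by name: the statement is the Claim_ definition above) =====
theorem infer_class_indices_spec : Claim_equal_infer_class_indices := by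
  intro xs _ _
  unfold Spec_infer_class_indices infer_class_indices infer_class_indices_alt
  rw [pvFold_eq_sel]
  simp only [pvStarts0, pvStarts1]
  rw [← pvPick_eq_sel (fun p => PySem.Str.isIn "normal" p.1 || PySem.Str.isIn "benign" p.1) "0_" xs,
      ← pvPick_eq_sel (fun p => PySem.Str.isIn "cancer" p.1) "1_" xs]
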